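-- pv_equiv track=rewrite | github.com/devarshh/CodeSignal | The Core/4. Loop Tunnel/28. lineup.py | solution
-- ===== SOURCE A (Python) =====
-- def solution(commands):
--     count = 0
--     smart = 0
--     dumb = 0
--     for command in commands:
--         if command == 'A':
--             smart = (smart + 2) % 4
--             dumb = (dumb + 2) % 4
--         elif command == 'L':
--             smart = (smart - 1) % 4
--             dumb = (dumb + 1) % 4
--         elif command == 'R':
--             smart = (smart + 1) % 4
--             dumb = (dumb - 1) % 4
--         if smart == dumb:
--             count += 1
--     return count
-- ===== SOURCE B (Python) =====
-- def solution(commands):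
--     # parity trick: the robots align exactly when the number of turn
--     # commands ('L' or 'R') seen so far is even
--     count = 0
--     turns = 0
--     for command in commands:
--         if command == 'L' or command == 'R':
--             turns += 1
--         if turns % 2 == 0:
--             count += 1
--     return count
-- ===== Notes on version B (the rewrite author's own statement) =====
-- stated objective: simpler
-- what changed: Replaced the two rotating mod-4 orientation states by a single turn counter: the robots align exactly when the number of 'L'/'R' commands so far is even, so B just tracks that parity.
import Mathlib
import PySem

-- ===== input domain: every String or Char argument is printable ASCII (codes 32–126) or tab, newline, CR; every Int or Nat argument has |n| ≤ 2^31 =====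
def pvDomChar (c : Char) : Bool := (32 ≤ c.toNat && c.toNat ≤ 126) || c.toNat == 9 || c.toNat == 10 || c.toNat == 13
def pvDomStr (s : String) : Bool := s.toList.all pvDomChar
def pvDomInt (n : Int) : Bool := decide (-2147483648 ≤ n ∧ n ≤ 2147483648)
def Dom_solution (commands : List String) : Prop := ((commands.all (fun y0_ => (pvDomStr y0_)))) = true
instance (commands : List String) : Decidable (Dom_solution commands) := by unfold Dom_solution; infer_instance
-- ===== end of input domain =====

-- B replaces A's two rotating mod-4 orientation states by a single turn counter
-- whose parity decides alignment (objective: simpler).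


-- ===== PORT A =====
def solStepA (st : Int × Int × Int) (command : String) : Int × Int × Int :=
  let count := st.1
  let smart := st.2.1
  let dumb := st.2.2
  let sd : Int × Int :=
    if command == "A" then (PySem.Int.mod (smart + 2) 4, PySem.Int.mod (dumb + 2) 4)
    else if command == "L" then (PySem.Int.mod (smart - 1) 4, PySem.Int.mod (dumb + 1) 4)
    else if command == "R" then (PySem.Int.mod (smart + 1) 4, PySem.Int.mod (dumb - 1) 4)
    else (smart, dumb)
  let count := if sd.1 == sd.2 then count + 1 else count
  (count, sd.1, sd.2)

def solution (commands : List String) : Int :=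
  (commands.foldl solStepA (0, 0, 0)).1

-- ===== PORT B =====
def solStepB (st : Int × Int) (command : String) : Int × Int :=
  let turns := if command == "L" || command == "R" then st.2 + 1 else st.2
  let count := if PySem.Int.mod turns 2 == 0 then st.1 + 1 else st.1
  (count, turns)

def solution_alt (commands : List String) : Int :=
  (commands.foldl solStepB (0, 0)).1

-- ===== PRECONDITION & SPEC =====
def Spec_solution (commands : List String) (out : Int) : Prop := out = solution_alt commands
instance (commands : List String) (out : Int) : Decidable (Spec_solution commands out) := by unfold Spec_solution; infer_instance

-- ===== CLAIM (what is proved, stated in full; the proofs are below) =====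
def Claim_equal_solution : Prop := ∀ (commands : List String), Dom_solution commands → Spec_solution commands (solution commands)

-- ===== LEMMAS AND PROOFS =====

-- Invariant linking A's state (count, smart, dumb) with B's (count, turns):
-- same count, dumb is the mod-4 negation of smart, and smart and turns share parity,
-- with smart kept in [0,4).
theorem solution_loop_eq (cs : List String) (count smart dumb turns : Int)
    (hsd : dumb = PySem.Int.mod (-smart) 4)
    (hp : PySem.Int.mod smart 2 = PySem.Int.mod turns 2)
    (hlo : 0 ≤ smart) (hhi : smart < 4) :
    (cs.foldl solStepA (count, smart, dumb)).1 = (cs.foldl solStepB (count, turns)).1 := by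
  induction cs generalizing count smart dumb turns with
  | nil => rfl
  | cons c cs ih =>
    have hm2 : ∀ a : Int, PySem.Int.mod a 2 = a % 2 :=
      fun a => PySem.Int.mod_eq_emod_of_pos (by omega)
    have hm4 : ∀ a : Int, PySem.Int.mod a 4 = a % 4 :=
      fun a => PySem.Int.mod_eq_emod_of_pos (by omega)
    simp only [hm4] at hsd
    simp only [hm2] at hp
    subst hsd
    simp only [List.foldl_cons]
    have hc : c = "A" ∨ c = "L" ∨ c = "R" ∨ (c ≠ "A" ∧ c ≠ "L" ∧ c ≠ "R") := by tauto
    interval_cases smart <;>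
      rcases hc with h | h | h | ⟨h1, h2, h3⟩ <;>
      (try subst h) <;>
      (first
        | simp [solStepA, solStepB, beq_iff_eq, hm2, hm4, h1, h2, h3]
        | simp [solStepA, solStepB, beq_iff_eq, hm2, hm4]) <;>
      split_ifs <;>
      first
        | (apply ih <;> (try simp only [hm2, hm4]) <;> omega)
        | (exfalso; omega)

-- ===== VERDICT (by name: the statement is the Claim_ definition above) =====
theorem solution_spec : Claim_equal_solution := by
  intro commands _
  unfold Spec_solution solution solution_alt
  exact solution_loop_eq commands 0 0 0 0 (by decide) (by decide) (by decide) (by decide)
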